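-- pv_equiv track=rewrite | github.com/sohank-17/Neon-AI-Project | multi_llm_chatbot_backend/app/models/persona.py | _extract_heading_blocks
-- ===== SOURCE A (Python) =====
-- from typing import List, Dict
--
-- def _extract_heading_blocks(lines: List[str]) -> Dict[str, List[str]]:
--     # Return mapping of 'ThoughtR', 'What to do', 'Next step' -> list of content lines
--     sections = {"Thought": [], "What to do": [], "Next step": []}
--     current = None
--     for l in lines:
--         if l.strip().lower().startswith("### thought"):
--             current = "Thought"
--             continue
--         if l.strip().lower().startswith("### what to do"):
--             current = "What to do"
--             continue
--         if l.strip().lower().startswith("### next step"):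
--             current = "Next step"
--             continue
--         if current:
--             sections[current].append(l)
--     return sections
-- ===== SOURCE B (Python) =====
-- from typing import List, Dict
--
--
-- def _head(l: str):
--     s = l.strip().lower()
--     if s.startswith("### thought"):
--         return "Thought"
--     if s.startswith("### what to do"):
--         return "What to do"
--     if s.startswith("### next step"):
--         return "Next step"
--     return None
--
--
-- def _extract_heading_blocks(lines: List[str]) -> Dict[str, List[str]]:
--     # pass 1: classify every line once
--     tagged = [(_head(l), l) for l in lines]
--     sections = {"Thought": [], "What to do": [], "Next step": []}
--     n = len(tagged)
--     i = 0
--     # skip the preamble before the first heading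
--     while i < n and tagged[i][0] is None:
--         i += 1
--     # pass 2: split the rest into blocks (heading + its span of content lines)
--     while i < n:
--         name = tagged[i][0]
--         j = i + 1
--         while j < n and tagged[j][0] is None:
--             j += 1
--         sections[name].extend(l for (_, l) in tagged[i + 1:j])
--         i = j
--     return sections
-- ===== Notes on version B (the rewrite author's own statement) =====
-- stated objective: alternative
-- what changed: Replaces A's per-line state machine carrying a 'current' section across a single fold by a block-structured scan: skip the preamble, then repeatedly locate a heading, take the span of non-heading lines after it as one slice, and extend the section with that whole block.
import Mathlib
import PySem

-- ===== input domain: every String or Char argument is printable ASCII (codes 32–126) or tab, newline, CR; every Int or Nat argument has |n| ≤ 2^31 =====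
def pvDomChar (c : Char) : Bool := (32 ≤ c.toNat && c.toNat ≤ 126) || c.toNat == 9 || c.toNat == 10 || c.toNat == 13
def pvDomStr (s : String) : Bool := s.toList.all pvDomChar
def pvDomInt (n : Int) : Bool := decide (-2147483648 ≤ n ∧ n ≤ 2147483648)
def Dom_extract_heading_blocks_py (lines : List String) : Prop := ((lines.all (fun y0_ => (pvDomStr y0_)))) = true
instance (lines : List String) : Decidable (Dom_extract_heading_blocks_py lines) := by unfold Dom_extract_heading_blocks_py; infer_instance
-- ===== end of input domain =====

-- B replaces A's per-line 'current' state machine by a classify-once pass followed by a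
-- block-structured scan (skip preamble, then heading + span of content lines per block).

-- ===== PORT A =====
-- one fold over the lines carrying (sections, current); 'if current:' is the Option match
-- (the three section names are non-empty strings, so truthiness = Option.isSome);
-- sections[current].append(l) is modify at a key that is always one of the three initial keys.
def ehbAStep (st : PySem.Dict String (List String) × Option String) (l : String) :
    PySem.Dict String (List String) × Option String :=
  if PySem.Str.startswith (PySem.Str.lower (PySem.Str.strip l)) "### thought" then
    (st.1, some "Thought")
  else if PySem.Str.startswith (PySem.Str.lower (PySem.Str.strip l)) "### what to do" then
    (st.1, some "What to do")
  else if PySem.Str.startswith (PySem.Str.lower (PySem.Str.strip l)) "### next step" then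
    (st.1, some "Next step")
  else
    match st.2 with
    | some c => (st.1.modify c [] (fun xs => xs ++ [l]), st.2)
    | none => st

def extract_heading_blocks_py (lines : List String) : List (String × List String) :=
  let sections : PySem.Dict String (List String) :=
    PySem.Dict.ofList [("Thought", []), ("What to do", []), ("Next step", [])]
  (lines.foldl ehbAStep (sections, none)).1.items

-- ===== PORT B =====
def ehbHead (l : String) : Option String :=
  let s := PySem.Str.lower (PySem.Str.strip l)
  if PySem.Str.startswith s "### thought" then some "Thought"
  else if PySem.Str.startswith s "### what to do" then some "What to do"
  else if PySem.Str.startswith s "### next step" then some "Next step"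
  else none

-- pass 1 of Source B: tagged = [(_head(l), l) for l in lines]
def ehbTag (lines : List String) : List (Option String × String) :=
  lines.map (fun l => (ehbHead l, l))

-- Source B's first while loop (advance i past non-heading lines) as recursion on the suffix
def ehbSkipT : List (Option String × String) → List (Option String × String)
  | [] => []
  | t :: ts => if t.1.isNone then ehbSkipT ts else t :: ts

-- Source B's inner while loop (advance j over the content span): returns
-- (the content lines of tagged[i+1:j], the remaining suffix from j)
def ehbSpanT : List (Option String × String) → List String × List (Option String × String)
  | [] => ([], [])
  | t :: ts => if t.1.isNone then (t.2 :: (ehbSpanT ts).1, (ehbSpanT ts).2) else ([], t :: ts)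

theorem ehbSpanT_snd_length_le (ts : List (Option String × String)) :
    (ehbSpanT ts).2.length ≤ ts.length := by
  induction ts with
  | nil => simp [ehbSpanT]
  | cons t ts ih =>
      by_cases h : t.1.isNone
      · simp only [ehbSpanT, h, if_true]
        exact Nat.le_succ_of_le ih
      · simp [ehbSpanT, h]

-- Source B's outer while loop: one block (heading + content span) per iteration
def ehbLoopT (d : PySem.Dict String (List String)) :
    List (Option String × String) → PySem.Dict String (List String)
  | [] => d
  | t :: ts =>
      match t.1 with
      | some name => ehbLoopT (d.modify name [] (fun xs => xs ++ (ehbSpanT ts).1)) (ehbSpanT ts).2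
      | none => ehbLoopT d ts
  termination_by ts => ts.length
  decreasing_by
  · exact Nat.lt_succ_of_le (ehbSpanT_snd_length_le ts)
  · exact Nat.lt_succ_of_le (Nat.le_refl _)

def extract_heading_blocks_py_alt (lines : List String) : List (String × List String) :=
  let sections : PySem.Dict String (List String) :=
    PySem.Dict.ofList [("Thought", []), ("What to do", []), ("Next step", [])]
  (ehbLoopT sections (ehbSkipT (ehbTag lines))).items

-- ===== PRECONDITION & SPEC =====
def Spec_extract_heading_blocks_py (lines : List String) (out : List (String × List String)) : Prop := out = extract_heading_blocks_py_alt lines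
instance (lines : List String) (out : List (String × List String)) : Decidable (Spec_extract_heading_blocks_py lines out) := by unfold Spec_extract_heading_blocks_py; infer_instance

-- ===== CLAIM (what is proved, stated in full; the proofs are below) =====
def Claim_equal_extract_heading_blocks_py : Prop := ∀ (lines : List String), Dom_extract_heading_blocks_py lines → Spec_extract_heading_blocks_py lines (extract_heading_blocks_py lines)

-- ===== LEMMAS AND PROOFS =====

theorem ehbLoopT_nil (d : PySem.Dict String (List String)) : ehbLoopT d [] = d := by
  rw [ehbLoopT]

theorem ehbLoopT_cons (d : PySem.Dict String (List String)) (t : Option String × String)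
    (ts : List (Option String × String)) :
    ehbLoopT d (t :: ts) =
      match t.1 with
      | some name => ehbLoopT (d.modify name [] (fun xs => xs ++ (ehbSpanT ts).1)) (ehbSpanT ts).2
      | none => ehbLoopT d ts := by
  rw [ehbLoopT]

-- A's step, expressed through B's heading classifier (same tests in the same order)
theorem ehbAStep_eq (st : PySem.Dict String (List String) × Option String) (l : String) :
    ehbAStep st l =
      match ehbHead l with
      | some m => (st.1, some m)
      | none =>
          match st.2 with
          | some c => (st.1.modify c [] (fun xs => xs ++ [l]), st.2)
          | none => st := by
  simp only [ehbAStep, ehbHead]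
  split_ifs <;> rfl

theorem ehbHead_mem {l : String} {m : String} (h : ehbHead l = some m) :
    m = "Thought" ∨ m = "What to do" ∨ m = "Next step" := by
  simp only [ehbHead] at h
  split_ifs at h <;> simp_all

-- inserting back the value already stored at a present key is a no-op (keys Nodup)
theorem ehb_insert_getD_self (d : PySem.Dict String (List String)) (k : String)
    (dflt : List String) (hnd : d.keys.Nodup) (hc : d.contains k = true) :
    d.insert k (d.getD k dflt) = d := by
  apply PySem.Dict.ext
  rw [PySem.Dict.items_insert_of_contains _ _ hc]
  have h : ∀ p ∈ d.items, (if p.1 == k then (k, d.getD k dflt) else p) = p := by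
    rintro ⟨p1, p2⟩ hp
    by_cases hk : p1 = k
    · subst hk
      have := PySem.Dict.getD_of_mem_items d hp hnd dflt
      simp [this]
    · simp [hk]
  rw [List.map_congr_left h]
  simp

theorem ehb_modify_modify_self (d : PySem.Dict String (List String)) (k : String)
    (f g : List String → List String) :
    (d.modify k [] f).modify k [] g = d.modify k [] (fun xs => g (f xs)) := by
  simp only [PySem.Dict.modify]
  rw [PySem.Dict.getD_insert_self, PySem.Dict.insert_insert_self]

-- the invariant the loops preserve: exactly the three section keys, in order
def ehbKeysOK (d : PySem.Dict String (List String)) : Prop :=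
  d.keys = ["Thought", "What to do", "Next step"]

theorem ehbKeysOK_nodup {d : PySem.Dict String (List String)} (h : ehbKeysOK d) :
    d.keys.Nodup := by rw [h]; decide

theorem ehbKeysOK_contains {d : PySem.Dict String (List String)} (h : ehbKeysOK d)
    {m : String} (hm : m = "Thought" ∨ m = "What to do" ∨ m = "Next step") :
    d.contains m = true := by
  rw [PySem.Dict.contains_eq_decide_mem_keys, h]
  rcases hm with h | h | h <;> simp [h]

theorem ehbKeysOK_modify {d : PySem.Dict String (List String)} (h : ehbKeysOK d)
    {m : String} (hm : m = "Thought" ∨ m = "What to do" ∨ m = "Next step")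
    (f : List String → List String) : ehbKeysOK (d.modify m [] f) := by
  unfold ehbKeysOK
  rw [PySem.Dict.modify, PySem.Dict.keys_insert_of_contains _ _ (ehbKeysOK_contains h hm)]
  exact h

theorem ehb_modify_nil {d : PySem.Dict String (List String)} (h : ehbKeysOK d)
    {m : String} (hm : m = "Thought" ∨ m = "What to do" ∨ m = "Next step") :
    d.modify m [] (fun xs => xs ++ ([] : List String)) = d := by
  simp only [PySem.Dict.modify, List.append_nil]
  exact ehb_insert_getD_self d m [] (ehbKeysOK_nodup h) (ehbKeysOK_contains h hm)

-- A's fold from state (d, some name) is B's loop with name's block being accumulated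
theorem ehb_fold_some (ls : List String) :
    ∀ (d : PySem.Dict String (List String)) (name : String), ehbKeysOK d →
      (name = "Thought" ∨ name = "What to do" ∨ name = "Next step") →
      (ls.foldl ehbAStep (d, some name)).1 =
        ehbLoopT (d.modify name [] (fun xs => xs ++ (ehbSpanT (ehbTag ls)).1))
          (ehbSpanT (ehbTag ls)).2 := by
  induction ls with
  | nil =>
      intro d name hK hn
      simp only [List.foldl_nil, ehbTag, List.map_nil, ehbSpanT, ehbLoopT_nil]
      exact (ehb_modify_nil hK hn).symm
  | cons l ls ih =>
      intro d name hK hn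
      rw [List.foldl_cons, ehbAStep_eq]
      have hTag : ehbTag (l :: ls) = (ehbHead l, l) :: ehbTag ls := by
        simp [ehbTag]
      cases hHead : ehbHead l with
      | some m =>
          have hm := ehbHead_mem hHead
          rw [hTag, hHead]
          simp only [ehbSpanT, Option.isNone_some, Bool.false_eq_true, if_false,
            ehb_modify_nil hK hn, ehbLoopT_cons]
          exact ih d m hK hm
      | none =>
          rw [hTag, hHead]
          simp only [ehbSpanT, Option.isNone_none, if_true]
          rw [ih (d.modify name [] (fun xs => xs ++ [l])) name
              (ehbKeysOK_modify hK hn _) hn, ehb_modify_modify_self]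
          simp

-- A's fold from state (d, none) is B's skip-then-loop over the tagged lines
theorem ehb_fold_none (ls : List String) :
    ∀ (d : PySem.Dict String (List String)), ehbKeysOK d →
      (ls.foldl ehbAStep (d, none)).1 = ehbLoopT d (ehbSkipT (ehbTag ls)) := by
  induction ls with
  | nil => intro d _; simp [ehbTag, ehbSkipT, ehbLoopT_nil]
  | cons l ls ih =>
      intro d hK
      rw [List.foldl_cons, ehbAStep_eq]
      have hTag : ehbTag (l :: ls) = (ehbHead l, l) :: ehbTag ls := by
        simp [ehbTag]
      cases hHead : ehbHead l with
      | some m =>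
          rw [hTag, hHead]
          simp only [ehbSkipT, Option.isNone_some, Bool.false_eq_true, if_false, ehbLoopT_cons]
          exact ehb_fold_some ls d m hK (ehbHead_mem hHead)
      | none =>
          rw [hTag, hHead]
          simp only [ehbSkipT, Option.isNone_none, if_true]
          exact ih d hK

-- ===== VERDICT (by name: the statement is the Claim_ definition above) =====
theorem extract_heading_blocks_py_spec : Claim_equal_extract_heading_blocks_py := by
  intro lines _
  unfold Spec_extract_heading_blocks_py extract_heading_blocks_py extract_heading_blocks_py_alt
  exact congrArg PySem.Dict.items (ehb_fold_none lines _ (by unfold ehbKeysOK; decide))
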